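-- pv_equiv track=rewrite | github.com/cs-confs-br/cs-confs-br-data | scripts/generate_database_csvs.py | fix_common_typos
-- ===== SOURCE A (Python) =====
-- def fix_common_typos(name):
--     typo_fixes = {
--         'Workshp': 'Workshop',
--         'Conferece': 'Conference',
--         'Internation ': 'International ',
--         'Compuer': 'Computer',
--         'Symposim': 'Symposium',
--         'Proccedings': 'Proceedings',
--         'Intelligene': 'Intelligence'
--     }
--
--     for typo, fix in typo_fixes.items():
--         name = name.replace(typo, fix)
--
--     return name
-- ===== SOURCE B (Python) =====
-- def fix_common_typos(name):
--     typo_fixes = (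
--         ('Workshp', 'Workshop'),
--         ('Conferece', 'Conference'),
--         ('Internation ', 'International '),
--         ('Compuer', 'Computer'),
--         ('Symposim', 'Symposium'),
--         ('Proccedings', 'Proceedings'),
--         ('Intelligene', 'Intelligence'),
--     )
--     out = []
--     i = 0
--     n = len(name)
--     while i < n:
--         for typo, fix in typo_fixes:
--             if name.startswith(typo, i):
--                 out.append(fix)
--                 i += len(typo)
--                 break
--         else:
--             out.append(name[i])
--             i += 1
--     return ''.join(out)
-- ===== Notes on version B (the rewrite author's own statement) =====
-- stated objective: alternative
-- what changed: Replaces A's seven sequential whole-string replace passes by a single left-to-right scan that at each position substitutes the first matching typo (valid because the typo keys are pairwise prefix-incomparable and no fix re-creates a typo).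
import Mathlib
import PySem

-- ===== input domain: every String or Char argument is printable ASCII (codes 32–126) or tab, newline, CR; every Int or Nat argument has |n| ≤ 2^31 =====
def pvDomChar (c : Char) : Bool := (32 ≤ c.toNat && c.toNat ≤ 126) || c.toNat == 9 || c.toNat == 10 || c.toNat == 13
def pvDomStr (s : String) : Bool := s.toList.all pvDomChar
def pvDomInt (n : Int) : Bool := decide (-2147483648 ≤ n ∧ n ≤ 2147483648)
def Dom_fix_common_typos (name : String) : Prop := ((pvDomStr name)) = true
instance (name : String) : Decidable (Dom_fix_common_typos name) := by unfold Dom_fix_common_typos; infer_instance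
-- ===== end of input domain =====

-- B replaces A's seven sequential whole-string replace passes by a single left-to-right
-- first-match scan over the string; equal because the typo keys are pairwise
-- prefix-incomparable and no fix re-creates a typo (alternative decomposition, same cost).


-- ===== PORT A =====
-- the dict literal of A, a PySem.Dict in insertion order
def pvTypoFixes : PySem.Dict String String := PySem.Dict.mk
  [("Workshp", "Workshop"),
   ("Conferece", "Conference"),
   ("Internation ", "International "),
   ("Compuer", "Computer"),
   ("Symposim", "Symposium"),
   ("Proccedings", "Proceedings"),
   ("Intelligene", "Intelligence")]

-- for typo, fix in typo_fixes.items(): name = name.replace(typo, fix)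
def fix_common_typos (name : String) : String :=
  pvTypoFixes.items.foldl (fun n p => PySem.Str.replace n p.1 p.2) name

-- ===== PORT B =====
-- B's tuple of (typo, fix) pairs, as lists of chars
def pvTypoPairs : List (List Char × List Char) :=
  [("Workshp".toList, "Workshop".toList),
   ("Conferece".toList, "Conference".toList),
   ("Internation ".toList, "International ".toList),
   ("Compuer".toList, "Computer".toList),
   ("Symposim".toList, "Symposium".toList),
   ("Proccedings".toList, "Proceedings".toList),
   ("Intelligene".toList, "Intelligence".toList)]

-- B's inner for-loop: the first pair whose typo starts at the current position
def pvMatchTypo (l : List Char) : Option (List Char × List Char) :=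
  pvTypoPairs.find? (fun p => p.1.isPrefixOf l)

-- termination helper for the scan (cited by pvScan's decreasing_by)
theorem pvMatchTypo_some_lt (l : List Char) (p : List Char × List Char)
    (h : pvMatchTypo l = some p) : (List.drop p.1.length l).length < l.length := by
  unfold pvMatchTypo at h
  rw [List.find?_eq_some_iff_append] at h
  obtain ⟨hpref, as, bs, heq, -⟩ := h
  have hmem : p ∈ pvTypoPairs := by rw [heq]; exact List.mem_append_right _ (List.mem_cons_self)
  have hne : p.1 ≠ [] := by
    have : ∀ q ∈ pvTypoPairs, q.1 ≠ [] := by decide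
    exact this p hmem
  have hle : p.1.length ≤ l.length :=
    List.IsPrefix.length_le (List.isPrefixOf_iff_prefix.mp hpref)
  have h1 : 1 ≤ p.1.length := List.length_pos_of_ne_nil hne
  simp only [List.length_drop]
  omega

-- B's while loop: one left-to-right pass, first matching typo replaced, else copy the char
def pvScan : List Char → List Char
  | [] => []
  | c :: t =>
    match h : pvMatchTypo (c :: t) with
    | some p => p.2 ++ pvScan (List.drop p.1.length (c :: t))
    | none => c :: pvScan t
termination_by l => l.length
decreasing_by
  · exact pvMatchTypo_some_lt _ _ h
  · simp

def fix_common_typos_alt (name : String) : String :=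
  String.ofList (pvScan name.toList)

-- ===== PRECONDITION & SPEC =====
def Spec_fix_common_typos (name : String) (out : String) : Prop := out = fix_common_typos_alt name
instance (name : String) (out : String) : Decidable (Spec_fix_common_typos name out) := by unfold Spec_fix_common_typos; infer_instance

-- ===== CLAIM (what is proved, stated in full; the proofs are below) =====
def Claim_equal_fix_common_typos : Prop := ∀ (name : String), Dom_fix_common_typos name → Spec_fix_common_typos name (fix_common_typos name)

-- ===== LEMMAS AND PROOFS =====

-- uppercase ASCII letter
def pvUp (c : Char) : Bool := 'A' ≤ c && c ≤ 'Z'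

-- nonempty, uppercase head, no uppercase after the head
def pvCapLow : List Char → Bool
  | [] => false
  | c :: t => pvUp c && t.all (fun d => !pvUp d)

theorem pvCapLow_ne {l : List Char} (h : pvCapLow l = true) : l ≠ [] := by
  cases l with
  | nil => simp [pvCapLow] at h
  | cons c t => simp

theorem pvCapLow_head {l : List Char} (h : pvCapLow l = true) : pvUp l.headI = true := by
  cases l with
  | nil => simp [pvCapLow] at h
  | cons c t => simp only [pvCapLow, Bool.and_eq_true] at h; simpa [List.headI] using h.1

theorem pvCapLow_tail {l : List Char} (h : pvCapLow l = true) :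
    ∀ c ∈ l.tail, pvUp c = false := by
  cases l with
  | nil => simp [pvCapLow] at h
  | cons c t =>
    simp only [pvCapLow, Bool.and_eq_true, List.all_eq_true] at h
    intro d hd
    simpa using h.2 d hd

-- clean recursive model of Python str.replace (old nonempty)
def pvRepl (old new : List Char) (l : List Char) : List Char :=
  if h : old ≠ [] ∧ old.isPrefixOf l then new ++ pvRepl old new (List.drop old.length l)
  else
    match l with
    | [] => []
    | c :: t => c :: pvRepl old new t
termination_by l.length
decreasing_by
  · obtain ⟨hne, hp⟩ := h
    have hle : old.length ≤ l.length :=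
      List.IsPrefix.length_le (List.isPrefixOf_iff_prefix.mp hp)
    have h1 : 1 ≤ old.length := List.length_pos_of_ne_nil hne
    simp only [List.length_drop]
    omega
  · simp

theorem pvRepl_nil (old new : List Char) : pvRepl old new [] = [] := by
  rw [pvRepl]
  simp

theorem pvRepl_head (old new u : List Char) (h : old ≠ []) :
    pvRepl old new (old ++ u) = new ++ pvRepl old new u := by
  rw [pvRepl]
  rw [dif_pos ⟨h, List.isPrefixOf_iff_prefix.mpr (List.prefix_append old u)⟩]
  simp

theorem pvRepl_cons_neg (old new : List Char) (c : Char) (t : List Char)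
    (h : ¬ old <+: c :: t) : pvRepl old new (c :: t) = c :: pvRepl old new t := by
  rw [pvRepl]
  rw [dif_neg (by intro ⟨_, hp⟩; exact h (List.isPrefixOf_iff_prefix.mp hp))]

-- the kernel bridge: PySem's fuel-based replace equals pvRepl
theorem pvReplace_go_eq (old new : List Char) (hold : old ≠ []) :
    ∀ fuel l acc, l.length ≤ fuel →
      PySem.Chars.replace.go old new fuel l acc = acc.reverse ++ pvRepl old new l := by
  intro fuel
  induction fuel with
  | zero =>
    intro l acc hl
    have : l = [] := List.eq_nil_of_length_eq_zero (Nat.le_zero.mp hl)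
    subst this
    rw [PySem.Chars.replace.go.eq_def]
    simp [pvRepl_nil]
  | succ n ih =>
    intro l acc hl
    cases l with
    | nil =>
      rw [PySem.Chars.replace.go.eq_def]
      simp [pvRepl_nil]
    | cons c t =>
      rw [PySem.Chars.replace.go.eq_def]
      by_cases hp : old.isPrefixOf (c :: t)
      · simp only [hp, if_true]
        obtain ⟨u, hu⟩ := List.isPrefixOf_iff_prefix.mp hp
        have hdrop : List.drop old.length (c :: t) = u := by
          rw [← hu, List.drop_left]
        have h1 : 1 ≤ old.length := List.length_pos_of_ne_nil hold
        have hlen2 := congrArg List.length hu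
        simp only [List.length_append, List.length_cons] at hlen2
        have hl' : (c :: t).length ≤ n + 1 := hl
        simp only [List.length_cons] at hl'
        have hulen : u.length ≤ n := by omega
        rw [hdrop, ih u _ hulen]
        rw [← hu, pvRepl_head old new u hold]
        simp
      · simp only [hp]
        have ht : t.length ≤ n := by
          simp only [List.length_cons] at hl; omega
        rw [if_neg (by simp)]
        rw [ih t _ ht]
        rw [pvRepl_cons_neg old new c t
          (fun hc => hp (List.isPrefixOf_iff_prefix.mpr hc))]
        simp

theorem pvReplace_eq_pvRepl (l old new : List Char) (hold : old ≠ []) :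
    PySem.Chars.replace l old new = pvRepl old new l := by
  unfold PySem.Chars.replace
  rw [if_neg (by simpa [List.isEmpty_iff] using hold)]
  have := pvReplace_go_eq old new hold l.length l [] (le_refl _)
  simpa using this

-- no string whose head is uppercase is a prefix of c :: t when c is not uppercase
theorem pv_not_prefix_of_low (k : List Char) (c : Char) (t : List Char)
    (hk : k ≠ []) (hku : pvUp (k.headI) = true) (hc : pvUp c = false) :
    ¬ k <+: c :: t := by
  intro h
  cases k with
  | nil => exact hk rfl
  | cons kc kt =>
    rw [List.cons_prefix_cons] at h
    obtain ⟨h1, -⟩ := h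
    simp only [List.headI] at hku
    rw [h1] at hku
    rw [hku] at hc
    exact absurd hc (by simp)

-- prefix-incomparable strings: k is not a prefix of a ++ w either
theorem pv_not_prefix_append (k a w : List Char) (h1 : ¬ k <+: a) (h2 : ¬ a <+: k) :
    ¬ k <+: a ++ w := by
  intro h
  by_cases hle : k.length ≤ a.length
  · exact h1 (List.prefix_of_prefix_length_le h (List.prefix_append a w) hle)
  · exact h2 (List.prefix_of_prefix_length_le (List.prefix_append a w) h (by omega))

-- pvRepl passes an all-lowercase block through untouched
theorem pvRepl_append_low (k f : List Char) (hk : k ≠ []) (hku : pvUp (k.headI) = true) :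
    ∀ a w, (∀ c ∈ a, pvUp c = false) → pvRepl k f (a ++ w) = a ++ pvRepl k f w := by
  intro a
  induction a with
  | nil => intro w _; simp
  | cons c a' ih =>
    intro w hlow
    have hc : pvUp c = false := hlow c (List.mem_cons_self)
    rw [List.cons_append, pvRepl_cons_neg _ _ _ _ (pv_not_prefix_of_low k c _ hk hku hc)]
    rw [ih w (fun d hd => hlow d (List.mem_cons_of_mem c hd))]
    simp

-- pvRepl passes a capLow block through untouched when its key is incomparable with it
theorem pvRepl_append (k f a w : List Char) (hk : k ≠ []) (hku : pvUp (k.headI) = true)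
    (ha : pvCapLow a = true) (h1 : ¬ k <+: a) (h2 : ¬ a <+: k) :
    pvRepl k f (a ++ w) = a ++ pvRepl k f w := by
  cases a with
  | nil => simp [pvCapLow] at ha
  | cons c a' =>
    have hlow : ∀ d ∈ a', pvUp d = false := pvCapLow_tail ha
    rw [List.cons_append,
      pvRepl_cons_neg _ _ _ _ (fun hc =>
        pv_not_prefix_append k (c :: a') w h1 h2 (by simpa using hc)),
      pvRepl_append_low k f hk hku a' w hlow]
    simp

-- an all-lowercase string is a prefix of pvRepl k f w iff it is a prefix of w
theorem pvRepl_lowpref_aux (k f : List Char) (hk : k ≠ []) (hku : pvUp (k.headI) = true)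
    (hf : f ≠ []) (hfu : pvUp (f.headI) = true) :
    ∀ n w q, w.length ≤ n → (∀ c ∈ q, pvUp c = false) →
      (q <+: pvRepl k f w ↔ q <+: w) := by
  intro n
  induction n with
  | zero =>
    intro w q hw _
    have : w = [] := List.eq_nil_of_length_eq_zero (Nat.le_zero.mp hw)
    subst this
    rw [pvRepl_nil]
  | succ n ih =>
    intro w q hw hq
    by_cases hp : k <+: w
    · obtain ⟨u, hu⟩ := hp
      rw [← hu, pvRepl_head k f u hk]
      cases q with
      | nil => simp
      | cons c0 q0 =>
        have hc0 : pvUp c0 = false := hq c0 (List.mem_cons_self)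
        constructor
        · intro h
          exfalso
          cases f with
          | nil => exact hf rfl
          | cons fc ft =>
            rw [List.cons_append, List.cons_prefix_cons] at h
            obtain ⟨he, -⟩ := h
            rw [he] at hc0
            simp only [List.headI] at hfu
            rw [hfu] at hc0
            exact absurd hc0 (by simp)
        · intro h
          exfalso
          cases k with
          | nil => exact hk rfl
          | cons kc kt =>
            rw [List.cons_append, List.cons_prefix_cons] at h
            obtain ⟨he, -⟩ := h
            rw [he] at hc0
            simp only [List.headI] at hku
            rw [hku] at hc0
            exact absurd hc0 (by simp)
    · cases w with
      | nil => rw [pvRepl_nil]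
      | cons c t =>
        rw [pvRepl_cons_neg k f c t hp]
        cases q with
        | nil => simp
        | cons c0 q0 =>
          rw [List.cons_prefix_cons, List.cons_prefix_cons]
          have ht : t.length ≤ n := by
            simp only [List.length_cons] at hw; omega
          have := ih t q0 ht (fun d hd => hq d (List.mem_cons_of_mem c0 hd))
          rw [this]

theorem pvRepl_lowpref (k f : List Char) (hk : k ≠ []) (hku : pvUp (k.headI) = true)
    (hf : f ≠ []) (hfu : pvUp (f.headI) = true) (w q : List Char)
    (hq : ∀ c ∈ q, pvUp c = false) : (q <+: pvRepl k f w ↔ q <+: w) :=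
  pvRepl_lowpref_aux k f hk hku hf hfu w.length w q (le_refl _) hq

-- the chain of A's replaces on a char list
def pvChain (P : List (List Char × List Char)) (l : List Char) : List Char :=
  P.foldl (fun s p => pvRepl p.1 p.2 s) l

theorem pvChain_cons_step (P : List (List Char × List Char)) (p : List Char × List Char)
    (l : List Char) : pvChain (p :: P) l = pvChain P (pvRepl p.1 p.2 l) := rfl

theorem pvChain_nil (P : List (List Char × List Char)) : pvChain P [] = [] := by
  induction P with
  | nil => rfl
  | cons p P ih => rw [pvChain_cons_step, pvRepl_nil]; exact ih

-- a char with no typo starting at it passes through the whole chain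
theorem pvChain_cons (P : List (List Char × List Char))
    (hP : ∀ p ∈ P, pvCapLow p.1 = true ∧ pvCapLow p.2 = true) :
    ∀ (c : Char) (t : List Char), (∀ p ∈ P, ¬ p.1 <+: c :: t) →
      pvChain P (c :: t) = c :: pvChain P t := by
  induction P with
  | nil => intro c t _; rfl
  | cons p P' ih =>
    intro c t hnp
    have hcap := hP p (List.mem_cons_self)
    have hk := pvCapLow_ne hcap.1
    have hku := pvCapLow_head hcap.1
    have hfne := pvCapLow_ne hcap.2
    have hfu := pvCapLow_head hcap.2
    rw [pvChain_cons_step, pvChain_cons_step,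
      pvRepl_cons_neg p.1 p.2 c t (hnp p (List.mem_cons_self))]
    apply ih (fun q hq => hP q (List.mem_cons_of_mem p hq))
    intro q hq hpre
    have hqcap := (hP q (List.mem_cons_of_mem p hq)).1
    cases hq1 : q.1 with
    | nil => exact pvCapLow_ne hqcap hq1
    | cons qc qt =>
      rw [hq1, List.cons_prefix_cons] at hpre
      obtain ⟨hqe, hqt⟩ := hpre
      have hlowqt : ∀ d ∈ qt, pvUp d = false := by
        have := pvCapLow_tail hqcap
        rw [hq1] at this
        exact this
      rw [pvRepl_lowpref p.1 p.2 hk hku hfne hfu t qt hlowqt] at hqt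
      exact hnp q (List.mem_cons_of_mem p hq) (by rw [hq1, hqe, List.cons_prefix_cons]; exact ⟨rfl, hqt⟩)

-- a capLow block incomparable with every key passes through the chain untouched
theorem pvChain_block (P : List (List Char × List Char))
    (hP : ∀ p ∈ P, pvCapLow p.1 = true) (a : List Char) (ha : pvCapLow a = true)
    (hinc : ∀ p ∈ P, ¬ p.1 <+: a ∧ ¬ a <+: p.1) :
    ∀ w, pvChain P (a ++ w) = a ++ pvChain P w := by
  induction P with
  | nil => intro w; rfl
  | cons p P' ih =>
    intro w
    have hcap := hP p (List.mem_cons_self)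
    rw [pvChain_cons_step, pvChain_cons_step,
      pvRepl_append p.1 p.2 a w (pvCapLow_ne hcap) (pvCapLow_head hcap) ha
        (hinc p (List.mem_cons_self)).1 (hinc p (List.mem_cons_self)).2]
    exact ih (fun q hq => hP q (List.mem_cons_of_mem p hq))
      (fun q hq => hinc q (List.mem_cons_of_mem p hq)) _

-- the key structural facts about the literal typo table
theorem pvFactCap : ∀ p ∈ pvTypoPairs, pvCapLow p.1 = true ∧ pvCapLow p.2 = true := by decide
theorem pvFactKK : ∀ p ∈ pvTypoPairs, ∀ q ∈ pvTypoPairs,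
    p.1 = q.1 ∨ (¬ p.1 <+: q.1 ∧ ¬ q.1 <+: p.1) := by decide
theorem pvFactKF : ∀ p ∈ pvTypoPairs, ∀ q ∈ pvTypoPairs,
    ¬ p.1 <+: q.2 ∧ ¬ q.2 <+: p.1 := by decide

theorem pvChain_eq_pvScan_aux : ∀ n l, l.length ≤ n → pvChain pvTypoPairs l = pvScan l := by
  intro n
  induction n with
  | zero =>
    intro l hl
    have : l = [] := List.eq_nil_of_length_eq_zero (Nat.le_zero.mp hl)
    subst this
    rw [pvChain_nil, pvScan]
  | succ n ih =>
    intro l hl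
    cases l with
    | nil => rw [pvChain_nil, pvScan]
    | cons c t =>
      rw [pvScan]
      cases hm : pvMatchTypo (c :: t) with
      | none =>
        simp only
        have hfail : ∀ p ∈ pvTypoPairs, ¬ p.1 <+: c :: t := by
          intro p hp hpre
          have := List.find?_eq_none.mp hm p hp
          exact this (List.isPrefixOf_iff_prefix.mpr hpre)
        rw [pvChain_cons pvTypoPairs pvFactCap c t hfail]
        have ht : t.length ≤ n := by simp only [List.length_cons] at hl; omega
        rw [ih t ht]
      | some p =>
        simp only
        have hm' := hm
        unfold pvMatchTypo at hm'
        rw [List.find?_eq_some_iff_append] at hm'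
        obtain ⟨hpref, as, bs, hsplit, hfail⟩ := hm'
        have hmem : p ∈ pvTypoPairs := by
          rw [hsplit]; exact List.mem_append_right _ (List.mem_cons_self)
        have hcap := pvFactCap p hmem
        have hkne : p.1 ≠ [] := pvCapLow_ne hcap.1
        obtain ⟨u, hu⟩ := List.isPrefixOf_iff_prefix.mp hpref
        have hdrop : List.drop p.1.length (c :: t) = u := by
          rw [← hu, List.drop_left]
        have hincAs : ∀ q ∈ as, ¬ q.1 <+: p.1 ∧ ¬ p.1 <+: q.1 := by
          intro q hq
          have hqmem : q ∈ pvTypoPairs := by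
            rw [hsplit]; exact List.mem_append_left _ hq
          rcases pvFactKK q hqmem p hmem with heq | hinc
          · exfalso
            have hfq := hfail q hq
            simp only [Bool.not_eq_eq_eq_not, Bool.not_true] at hfq
            rw [heq, hpref] at hfq
            simp at hfq
          · exact hinc
        have hincBs : ∀ q ∈ bs, ¬ q.1 <+: p.2 ∧ ¬ p.2 <+: q.1 := by
          intro q hq
          have hqmem : q ∈ pvTypoPairs := by
            rw [hsplit]; exact List.mem_append_right _ (List.mem_cons_of_mem p hq)
          exact pvFactKF q hqmem p hmem
        have hcapAs : ∀ q ∈ as, pvCapLow q.1 = true := by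
          intro q hq
          exact (pvFactCap q (by rw [hsplit]; exact List.mem_append_left _ hq)).1
        have hcapBs : ∀ q ∈ bs, pvCapLow q.1 = true := by
          intro q hq
          exact (pvFactCap q (by rw [hsplit]; exact List.mem_append_right _ (List.mem_cons_of_mem p hq))).1
        have hchain : ∀ x, pvChain pvTypoPairs x = pvChain bs (pvRepl p.1 p.2 (pvChain as x)) := by
          intro x
          rw [hsplit]
          simp [pvChain, List.foldl_append]
        have hulen : u.length ≤ n := by
          have h1 : 1 ≤ p.1.length := List.length_pos_of_ne_nil hkne
          have hlen2 := congrArg List.length hu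
          simp only [List.length_append, List.length_cons] at hlen2
          simp only [List.length_cons] at hl
          omega
        calc pvChain pvTypoPairs (c :: t)
            = pvChain bs (pvRepl p.1 p.2 (pvChain as (p.1 ++ u))) := by rw [hchain, hu]
          _ = pvChain bs (pvRepl p.1 p.2 (p.1 ++ pvChain as u)) := by
              rw [pvChain_block as hcapAs p.1 hcap.1 hincAs u]
          _ = pvChain bs (p.2 ++ pvRepl p.1 p.2 (pvChain as u)) := by
              rw [pvRepl_head p.1 p.2 _ hkne]
          _ = p.2 ++ pvChain bs (pvRepl p.1 p.2 (pvChain as u)) := by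
              rw [pvChain_block bs hcapBs p.2 hcap.2 hincBs]
          _ = p.2 ++ pvChain pvTypoPairs u := by rw [← hchain u]
          _ = p.2 ++ pvScan (List.drop p.1.length (c :: t)) := by rw [hdrop, ih u hulen]

theorem pvChain_eq_pvScan (l : List Char) : pvChain pvTypoPairs l = pvScan l :=
  pvChain_eq_pvScan_aux l.length l (le_refl _)

-- A's String-level fold equals pvChain of the corresponding char-list pairs
theorem pvStrFold_eq_pvChain : ∀ (P : List (String × String)) (s : String),
    (∀ p ∈ P, p.1.toList ≠ []) →
    (P.foldl (fun n p => PySem.Str.replace n p.1 p.2) s).toList =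
      pvChain (P.map (fun p => (p.1.toList, p.2.toList))) s.toList := by
  intro P
  induction P with
  | nil => intro s _; rfl
  | cons p P' ih =>
    intro s hne
    rw [List.foldl_cons, List.map_cons, pvChain_cons_step,
      ih _ (fun q hq => hne q (List.mem_cons_of_mem p hq))]
    congr 1
    rw [PySem.Str.toList_replace,
      pvReplace_eq_pvRepl _ _ _ (hne p (List.mem_cons_self))]

-- ===== VERDICT (by name: the statement is the Claim_ definition above) =====
theorem fix_common_typos_spec : Claim_equal_fix_common_typos := by
  intro name _
  unfold Spec_fix_common_typos fix_common_typos fix_common_typos_alt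
  rw [← String.toList_inj, String.toList_ofList]
  rw [pvStrFold_eq_pvChain pvTypoFixes.items name (by decide)]
  rw [show pvTypoFixes.items.map (fun p => (p.1.toList, p.2.toList)) = pvTypoPairs from by decide]
  exact pvChain_eq_pvScan name.toList
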